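-- pv_equiv track=rewrite | github.com/iarspider/curseDownloader | updater.py | get_filtered_files
-- ===== SOURCE A (Python) =====
-- def get_filtered_files(file_list):
--     remaining_alpha = 3
--     remaining_beta = 2
--     remaining_release = 2
--
--     filtered_list = []
--     for test_file in file_list:
--         if test_file["type"] == "release" and remaining_release > 0:
--             remaining_release -= 1
--         elif test_file["type"] == "beta" and remaining_beta > 0:
--             remaining_beta -= 1
--         elif test_file["type"] == "alpha" and remaining_alpha > 0:
--             remaining_alpha -= 1
--         else:
--             continue
--
--         filtered_list += [test_file]
--
--     return filtered_list
-- ===== SOURCE B (Python) =====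
-- _QUOTA = {"release": 2, "beta": 2, "alpha": 3}
--
--
-- def get_filtered_files(file_list):
--     # Stateless: keep a file iff its type is quota'd and fewer than the quota
--     # of that type occur before it in the list.
--     return [
--         f
--         for i, f in enumerate(file_list)
--         if f["type"] in _QUOTA
--         and sum(1 for g in file_list[:i] if g["type"] == f["type"]) < _QUOTA[f["type"]]
--     ]
-- ===== Notes on version B (the rewrite author's own statement) =====
-- stated objective: alternative
-- what changed: Replaces A's stateful loop with three mutable countdown counters by a stateless comprehension that keeps an element iff fewer than its type's quota of same-typed elements occur in the prefix before it (recounted per element).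
import Mathlib
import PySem

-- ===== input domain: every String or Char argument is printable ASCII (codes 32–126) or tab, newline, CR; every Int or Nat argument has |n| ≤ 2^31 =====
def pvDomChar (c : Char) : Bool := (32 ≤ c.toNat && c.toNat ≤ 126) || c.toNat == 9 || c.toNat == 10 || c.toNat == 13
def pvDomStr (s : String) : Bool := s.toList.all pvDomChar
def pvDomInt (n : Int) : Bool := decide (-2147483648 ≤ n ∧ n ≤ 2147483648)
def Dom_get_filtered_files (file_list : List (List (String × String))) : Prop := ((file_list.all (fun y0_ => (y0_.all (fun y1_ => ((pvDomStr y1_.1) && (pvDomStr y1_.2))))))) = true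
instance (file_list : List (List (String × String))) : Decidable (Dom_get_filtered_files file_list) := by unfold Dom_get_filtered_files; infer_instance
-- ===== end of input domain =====

-- B replaces A's stateful countdown loop by a stateless per-element prefix recount (alternative decomposition, same return value).

-- ===== PORT A =====
-- A's loop, state = (remaining_alpha, remaining_beta, remaining_release, filtered_list);
-- test_file["type"] is an association-list lookup (first match).
def pvALoop : Int → Int → Int → List (List (String × String)) → List (List (String × String)) → List (List (String × String))
  | _, _, _, acc, [] => acc
  | ra, rb, rr, acc, f :: rest =>
    if f.lookup "type" == some "release" && decide (0 < rr) then
      pvALoop ra rb (rr - 1) (acc ++ [f]) rest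
    else if f.lookup "type" == some "beta" && decide (0 < rb) then
      pvALoop ra (rb - 1) rr (acc ++ [f]) rest
    else if f.lookup "type" == some "alpha" && decide (0 < ra) then
      pvALoop (ra - 1) rb rr (acc ++ [f]) rest
    else
      pvALoop ra rb rr acc rest

def get_filtered_files (file_list : List (List (String × String))) : List (List (String × String)) :=
  pvALoop 3 2 2 [] file_list

-- ===== PORT B =====
-- Source B's comprehension over enumerate(file_list); the index from enumerate is ≥ 0, so
-- `.toNat` + `take` is exact for the Python slice file_list[:i].
def get_filtered_files_alt (file_list : List (List (String × String))) : List (List (String × String)) :=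
  ((PySem.List.enumerate file_list 0).filter (fun p =>
      match p.2.lookup "type" with
      | none => false
      | some t =>
        match ([("release", (2 : Int)), ("beta", 2), ("alpha", 3)]).lookup t with
        | none => false
        | some q =>
          decide (((((file_list.take p.1.toNat).countP
              (fun g => g.lookup "type" == some t) : Nat) : Int) < q)))).map (·.2)

-- ===== PRECONDITION & SPEC =====
-- Pre_ excludes exactly the inputs on which the Python A raises KeyError: a file dict without a "type" key.
def Pre_get_filtered_files (file_list : List (List (String × String))) : Prop :=
  ∀ f ∈ file_list, (f.lookup "type").isSome = true
instance (file_list : List (List (String × String))) : Decidable (Pre_get_filtered_files file_list) := by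
  unfold Pre_get_filtered_files; infer_instance

def pvWitness_get_filtered_files : (List (List (String × String))) :=
  [[("type", "release"), ("name", "a.jar")], [("type", "alpha")], [("type", "other")]]

def Spec_get_filtered_files (file_list : List (List (String × String))) (out : List (List (String × String))) : Prop := out = get_filtered_files_alt file_list
instance (file_list : List (List (String × String))) (out : List (List (String × String))) : Decidable (Spec_get_filtered_files file_list out) := by unfold Spec_get_filtered_files; infer_instance

-- ===== CLAIM (what is proved, stated in full; the proofs are below) =====
def Claim_equal_get_filtered_files : Prop := ∀ (file_list : List (List (String × String))), Dom_get_filtered_files file_list → Pre_get_filtered_files file_list → Spec_get_filtered_files file_list (get_filtered_files file_list)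

-- ===== LEMMAS AND PROOFS =====

def pvGo : Nat → Nat → Nat → List (List (String × String)) → List (List (String × String))
  | _, _, _, [] => []
  | cr, cb, ca, f :: rest =>
    if f.lookup "type" = some "release" then (if cr < 2 then [f] else []) ++ pvGo (cr + 1) cb ca rest
    else if f.lookup "type" = some "beta" then (if cb < 2 then [f] else []) ++ pvGo cr (cb + 1) ca rest
    else if f.lookup "type" = some "alpha" then (if ca < 3 then [f] else []) ++ pvGo cr cb (ca + 1) rest
    else pvGo cr cb ca rest

lemma pvALoop_eq_go : ∀ (l : List (List (String × String))) (cr cb ca : Nat)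
    (acc : List (List (String × String))),
    pvALoop (3 - min (ca : Int) 3) (2 - min (cb : Int) 2) (2 - min (cr : Int) 2) acc l
      = acc ++ pvGo cr cb ca l := by
  intro l
  induction l with
  | nil => intro cr cb ca acc; simp [pvALoop, pvGo]
  | cons f rest ih =>
    intro cr cb ca acc
    have hr : (0 < 2 - min ((cr : Int)) 2) = (cr < 2) := by simp only [eq_iff_iff]; omega
    have hbb : (0 < 2 - min ((cb : Int)) 2) = (cb < 2) := by simp only [eq_iff_iff]; omega
    have haa : (0 < 3 - min ((ca : Int)) 3) = (ca < 3) := by simp only [eq_iff_iff]; omega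
    have er1 : cr < 2 → (2 - min ((cr : Int)) 2) - 1 = 2 - min (((cr + 1 : Nat)) : Int) 2 := by
      intro hc; push_cast; omega
    have er0 : ¬ cr < 2 → (2 - min ((cr : Int)) 2) = 2 - min (((cr + 1 : Nat)) : Int) 2 := by
      intro hc; push_cast; omega
    have eb1 : cb < 2 → (2 - min ((cb : Int)) 2) - 1 = 2 - min (((cb + 1 : Nat)) : Int) 2 := by
      intro hc; push_cast; omega
    have eb0 : ¬ cb < 2 → (2 - min ((cb : Int)) 2) = 2 - min (((cb + 1 : Nat)) : Int) 2 := by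
      intro hc; push_cast; omega
    have ea1 : ca < 3 → (3 - min ((ca : Int)) 3) - 1 = 3 - min (((ca + 1 : Nat)) : Int) 3 := by
      intro hc; push_cast; omega
    have ea0 : ¬ ca < 3 → (3 - min ((ca : Int)) 3) = 3 - min (((ca + 1 : Nat)) : Int) 3 := by
      intro hc; push_cast; omega
    rcases h : f.lookup "type" with _ | t
    · simpa [pvALoop, pvGo, h] using ih cr cb ca acc
    · by_cases h1 : t = "release"
      · subst h1
        by_cases hc : cr < 2
        · simp only [pvALoop, pvGo, h, hr, hc, er1 hc, decide_true, Bool.and_true, beq_self_eq_true, if_pos]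
          rw [ih (cr + 1) cb ca (acc ++ [f])]; simp
        · simp only [pvALoop, pvGo, h, hr, hc, decide_false, Bool.and_false, if_false, beq_self_eq_true]
          rw [er0 hc, ih (cr + 1) cb ca acc]; simp
      · by_cases h2 : t = "beta"
        · subst h2
          by_cases hc : cb < 2
          · simp only [pvALoop, pvGo, h, hbb, hc, eb1 hc, decide_true, Bool.and_true, beq_self_eq_true]
            rw [ih cr (cb + 1) ca (acc ++ [f])]; simp
          · simp only [pvALoop, pvGo, h, hbb, hc, decide_false, Bool.and_false, if_false, beq_self_eq_true]
            rw [eb0 hc, ih cr (cb + 1) ca acc]; simp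
        · by_cases h3 : t = "alpha"
          · subst h3
            by_cases hc : ca < 3
            · simp only [pvALoop, pvGo, h, haa, hc, ea1 hc, decide_true, Bool.and_true, beq_self_eq_true]
              rw [ih cr cb (ca + 1) (acc ++ [f])]; simp
            · simp only [pvALoop, pvGo, h, haa, hc, decide_false, Bool.and_false, if_false, beq_self_eq_true]
              rw [ea0 hc, ih cr cb (ca + 1) acc]; simp
          · have hgo : pvGo cr cb ca (f :: rest) = pvGo cr cb ca rest := by
              conv_lhs => rw [pvGo.eq_def]
              simp [h, h1, h2, h3]
            rw [hgo, ← ih cr cb ca acc]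
            conv_lhs => rw [pvALoop.eq_def]
            simp [h, h1, h2, h3]

lemma alt_filter_eq_go : ∀ (rest pre : List (List (String × String))),
    ((PySem.List.enumerate rest ((pre.length : Nat) : Int)).filter (fun p =>
      match p.2.lookup "type" with
      | none => false
      | some t =>
        match ([("release", (2 : Int)), ("beta", 2), ("alpha", 3)]).lookup t with
        | none => false
        | some q =>
          decide (((((pre ++ rest).take p.1.toNat).countP
              (fun g => g.lookup "type" == some t) : Nat) : Int) < q))).map (·.2)
      = pvGo (pre.countP (fun g => g.lookup "type" == some "release"))
             (pre.countP (fun g => g.lookup "type" == some "beta"))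
             (pre.countP (fun g => g.lookup "type" == some "alpha")) rest := by
  intro rest
  induction rest with
  | nil => intro pre; simp [PySem.List.enumerate_nil, pvGo]
  | cons f rest ih =>
    intro pre
    have hstep : ((pre.length : Int) + 1) = (((pre ++ [f]).length : Nat) : Int) := by simp
    have hsplit : pre ++ f :: rest = (pre ++ [f]) ++ rest := by simp
    rw [PySem.List.enumerate_cons, List.filter_cons]
    have htake : (pre ++ f :: rest).take ((pre.length : Int)).toNat = pre := by
      simpa using List.take_left pre (f :: rest)
    have hq1 : List.lookup "release" ([("release", (2 : Int)), ("beta", 2), ("alpha", 3)]) = some 2 := by rfl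
    have hq2 : List.lookup "beta" ([("release", (2 : Int)), ("beta", 2), ("alpha", 3)]) = some 2 := by rfl
    have hq3 : List.lookup "alpha" ([("release", (2 : Int)), ("beta", 2), ("alpha", 3)]) = some 3 := by rfl
    rcases h : f.lookup "type" with _ | t
    · simp only [h, Bool.false_eq_true, if_false]
      rw [hstep, hsplit, ih (pre ++ [f])]
      simp only [List.countP_append, List.countP_cons, List.countP_nil, h]
      conv_rhs => rw [pvGo.eq_def]
      simp [h]
    · by_cases h1 : t = "release"
      · subst h1
        by_cases hc : (pre.countP (fun g => g.lookup "type" == some "release")) < 2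
        · have hdec : (decide (((pre.countP (fun g => g.lookup "type" == some "release") : Nat) : Int) < 2)) = true := by
            simpa using hc
          simp only [h, htake, hq1, hdec, if_true, List.map_cons]
          rw [hstep, hsplit, ih (pre ++ [f])]
          simp only [List.countP_append, List.countP_cons, List.countP_nil, h]
          conv_rhs => rw [pvGo.eq_def]
          simp [h, hc]
        · have hdec : (decide (((pre.countP (fun g => g.lookup "type" == some "release") : Nat) : Int) < 2)) = false := by
            simpa using hc
          simp only [h, htake, hq1, hdec, Bool.false_eq_true, if_false]
          rw [hstep, hsplit, ih (pre ++ [f])]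
          simp only [List.countP_append, List.countP_cons, List.countP_nil, h]
          conv_rhs => rw [pvGo.eq_def]
          simp [h, hc]
      · by_cases h2 : t = "beta"
        · subst h2
          by_cases hc : (pre.countP (fun g => g.lookup "type" == some "beta")) < 2
          · have hdec : (decide (((pre.countP (fun g => g.lookup "type" == some "beta") : Nat) : Int) < 2)) = true := by
              simpa using hc
            simp only [h, htake, hq2, hdec, if_true, List.map_cons]
            rw [hstep, hsplit, ih (pre ++ [f])]
            simp only [List.countP_append, List.countP_cons, List.countP_nil, h]
            conv_rhs => rw [pvGo.eq_def]
            simp [h, hc]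
          · have hdec : (decide (((pre.countP (fun g => g.lookup "type" == some "beta") : Nat) : Int) < 2)) = false := by
              simpa using hc
            simp only [h, htake, hq2, hdec, Bool.false_eq_true, if_false]
            rw [hstep, hsplit, ih (pre ++ [f])]
            simp only [List.countP_append, List.countP_cons, List.countP_nil, h]
            conv_rhs => rw [pvGo.eq_def]
            simp [h, hc]
        · by_cases h3 : t = "alpha"
          · subst h3
            by_cases hc : (pre.countP (fun g => g.lookup "type" == some "alpha")) < 3
            · have hdec : (decide (((pre.countP (fun g => g.lookup "type" == some "alpha") : Nat) : Int) < 3)) = true := by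
                simpa using hc
              simp only [h, htake, hq3, hdec, if_true, List.map_cons]
              rw [hstep, hsplit, ih (pre ++ [f])]
              simp only [List.countP_append, List.countP_cons, List.countP_nil, h]
              conv_rhs => rw [pvGo.eq_def]
              simp [h, hc]
            · have hdec : (decide (((pre.countP (fun g => g.lookup "type" == some "alpha") : Nat) : Int) < 3)) = false := by
                simpa using hc
              simp only [h, htake, hq3, hdec, Bool.false_eq_true, if_false]
              rw [hstep, hsplit, ih (pre ++ [f])]
              simp only [List.countP_append, List.countP_cons, List.countP_nil, h]
              conv_rhs => rw [pvGo.eq_def]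
              simp [h, hc]
          · have hqn : List.lookup t ([("release", (2 : Int)), ("beta", 2), ("alpha", 3)]) = none := by
              have b1 : (t == "release") = false := by simp [h1]
              have b2 : (t == "beta") = false := by simp [h2]
              have b3 : (t == "alpha") = false := by simp [h3]
              simp [List.lookup, b1, b2, b3]
            simp only [h, hqn, Bool.false_eq_true, if_false]
            rw [hstep, hsplit, ih (pre ++ [f])]
            simp only [List.countP_append, List.countP_cons, List.countP_nil, h]
            conv_rhs => rw [pvGo.eq_def]
            simp [h, h1, h2, h3]

-- ===== VERDICT (by name: the statement is the Claim_ definition above) =====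
theorem get_filtered_files_spec : Claim_equal_get_filtered_files := by
  intro fl _ _
  show get_filtered_files fl = get_filtered_files_alt fl
  have hA := pvALoop_eq_go fl 0 0 0 []
  have hB := alt_filter_eq_go fl []
  norm_num at hA
  simp only [List.nil_append, List.length_nil, List.countP_nil, Nat.cast_zero] at hB
  unfold get_filtered_files get_filtered_files_alt
  rw [hA]
  exact hB.symm
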